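-- pv_equiv track=rewrite | github.com/seandoll/AOC1 | power_consumptiom.py | is_one_dominant
-- ===== SOURCE A (Python) =====
-- def is_one_dominant(data, index):
--     one_count = 0
--     zero_count = 0
--     for item in data:
--         if item[index] == '1':
--             one_count += 1
--         else:
--             zero_count += 1
--
--     return one_count > zero_count
-- ===== SOURCE B (Python) =====
-- def is_one_dominant(data, index):
--     # Boyer-Moore majority vote over the two classes ('1' at index vs not):
--     # the final candidate survives with a positive streak iff it is the strict majority.
--     cand = False
--     cnt = 0
--     for item in data:
--         bit = item[index] == '1'
--         if cnt == 0:
--             cand, cnt = bit, 1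
--         elif bit == cand:
--             cnt += 1
--         else:
--             cnt -= 1
--     return cand and cnt > 0
-- ===== Notes on version B (the rewrite author's own statement) =====
-- stated objective: alternative
-- what changed: B replaces A's two explicit counters and final comparison with a Boyer-Moore majority vote: a single (candidate, streak) state updated per item, returning whether the '1' class survives with a positive streak.
import Mathlib
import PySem

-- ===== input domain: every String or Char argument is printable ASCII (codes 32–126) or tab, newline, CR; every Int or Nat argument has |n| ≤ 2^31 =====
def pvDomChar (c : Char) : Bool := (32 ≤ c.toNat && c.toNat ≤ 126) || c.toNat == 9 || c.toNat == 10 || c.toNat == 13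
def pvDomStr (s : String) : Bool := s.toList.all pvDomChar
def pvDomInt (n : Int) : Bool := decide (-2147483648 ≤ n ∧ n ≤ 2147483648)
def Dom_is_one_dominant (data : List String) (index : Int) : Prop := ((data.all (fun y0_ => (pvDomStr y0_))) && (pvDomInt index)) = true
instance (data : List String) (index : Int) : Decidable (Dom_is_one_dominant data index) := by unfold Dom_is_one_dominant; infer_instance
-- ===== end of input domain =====

-- B replaces A's two explicit counters with a Boyer-Moore majority vote
-- (single candidate/streak state); objective: alternative algorithm, same cost.

-- ===== PORT A =====
-- A: two counters updated per item, then one_count > zero_count.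
def is_one_dominant (data : List String) (index : Int) : Bool :=
  let cs := data.foldl
    (fun (acc : Int × Int) item =>
      if PySem.Str.pyGet? item index = some '1' then (acc.1 + 1, acc.2) else (acc.1, acc.2 + 1))
    (0, 0)
  decide (cs.1 > cs.2)

-- ===== PORT B =====
-- B: Boyer-Moore vote — state (cand, cnt); result: cand survives with cnt > 0.
def is_one_dominant_alt (data : List String) (index : Int) : Bool :=
  let st := data.foldl
    (fun (st : Bool × Int) item =>
      let bit : Bool := decide (PySem.Str.pyGet? item index = some '1')
      if st.2 = 0 then (bit, 1)
      else if bit = st.1 then (st.1, st.2 + 1)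
      else (st.1, st.2 - 1))
    (false, 0)
  st.1 && decide (st.2 > 0)

-- ===== PRECONDITION & SPEC =====
-- Pre_: every item's index is in range (otherwise Python A raises IndexError on item[index]).
def Pre_is_one_dominant (data : List String) (index : Int) : Prop :=
  ∀ s ∈ data, PySem.Raise.InRange s.toList.length index
instance (data : List String) (index : Int) : Decidable (Pre_is_one_dominant data index) := by
  unfold Pre_is_one_dominant; infer_instance
def pvWitness_is_one_dominant : List String × Int := (["10", "11", "01"], 1)

def Spec_is_one_dominant (data : List String) (index : Int) (out : Bool) : Prop := out = is_one_dominant_alt data index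
instance (data : List String) (index : Int) (out : Bool) : Decidable (Spec_is_one_dominant data index out) := by unfold Spec_is_one_dominant; infer_instance

-- ===== CLAIM (what is proved, stated in full; the proofs are below) =====
def Claim_equal_is_one_dominant : Prop := ∀ (data : List String) (index : Int), Dom_is_one_dominant data index → Pre_is_one_dominant data index → Spec_is_one_dominant data index (is_one_dominant data index)

-- ===== LEMMAS AND PROOFS =====

-- Joint invariant: A's counters move by ones/zeros; B's state keeps cnt ≥ 0 and
-- signed streak (cand ? cnt : -cnt) equal to ones - zeros (valid because there
-- are only two classes, so votes cancel exactly).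
theorem vote_invariant (index : Int) (data : List String) (a b : Int) (cand : Bool) (cnt : Int)
    (hnn : 0 ≤ cnt) (hinv : (if cand then cnt else -cnt) = a - b) :
    0 ≤ (data.foldl
      (fun (st : Bool × Int) item =>
        let bit : Bool := decide (PySem.Str.pyGet? item index = some '1')
        if st.2 = 0 then (bit, 1)
        else if bit = st.1 then (st.1, st.2 + 1)
        else (st.1, st.2 - 1))
      (cand, cnt)).2 ∧
    (if (data.foldl
      (fun (st : Bool × Int) item =>
        let bit : Bool := decide (PySem.Str.pyGet? item index = some '1')
        if st.2 = 0 then (bit, 1)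
        else if bit = st.1 then (st.1, st.2 + 1)
        else (st.1, st.2 - 1))
      (cand, cnt)).1
     then (data.foldl
      (fun (st : Bool × Int) item =>
        let bit : Bool := decide (PySem.Str.pyGet? item index = some '1')
        if st.2 = 0 then (bit, 1)
        else if bit = st.1 then (st.1, st.2 + 1)
        else (st.1, st.2 - 1))
      (cand, cnt)).2
     else -(data.foldl
      (fun (st : Bool × Int) item =>
        let bit : Bool := decide (PySem.Str.pyGet? item index = some '1')
        if st.2 = 0 then (bit, 1)
        else if bit = st.1 then (st.1, st.2 + 1)
        else (st.1, st.2 - 1))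
      (cand, cnt)).2)
    = (data.foldl
      (fun (acc : Int × Int) item =>
        if PySem.Str.pyGet? item index = some '1' then (acc.1 + 1, acc.2) else (acc.1, acc.2 + 1))
      (a, b)).1
      - (data.foldl
      (fun (acc : Int × Int) item =>
        if PySem.Str.pyGet? item index = some '1' then (acc.1 + 1, acc.2) else (acc.1, acc.2 + 1))
      (a, b)).2 := by
  induction data generalizing a b cand cnt with
  | nil => exact ⟨hnn, hinv⟩
  | cons x xs ih =>
    simp only [List.foldl_cons]
    by_cases hx : PySem.Str.pyGet? x index = some '1'
    · rw [if_pos hx, decide_eq_true hx]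
      by_cases hz : cnt = 0
      · rw [if_pos hz]
        refine ih (a + 1) b true 1 (by omega) ?_
        rcases cand with _ | _ <;> simp at hinv ⊢ <;> omega
      · rw [if_neg hz]
        rcases cand with _ | _
        · rw [if_neg (by decide : ¬(true = false))]
          refine ih (a + 1) b false (cnt - 1) (by omega) ?_
          simp at hinv ⊢; omega
        · rw [if_pos rfl]
          refine ih (a + 1) b true (cnt + 1) (by omega) ?_
          simp at hinv ⊢; omega
    · rw [if_neg hx, decide_eq_false hx]
      by_cases hz : cnt = 0
      · rw [if_pos hz]
        refine ih a (b + 1) false 1 (by omega) ?_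
        rcases cand with _ | _ <;> simp at hinv ⊢ <;> omega
      · rw [if_neg hz]
        rcases cand with _ | _
        · rw [if_pos rfl]
          refine ih a (b + 1) false (cnt + 1) (by omega) ?_
          simp at hinv ⊢; omega
        · rw [if_neg (by decide : ¬(false = true))]
          refine ih a (b + 1) true (cnt - 1) (by omega) ?_
          simp at hinv ⊢; omega

-- ===== VERDICT (by name: the statement is the Claim_ definition above) =====
theorem is_one_dominant_spec : Claim_equal_is_one_dominant := by
  intro data index _ _
  unfold Spec_is_one_dominant is_one_dominant is_one_dominant_alt
  have h := vote_invariant index data 0 0 false 0 le_rfl (by simp)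
  obtain ⟨h1, h2⟩ := h
  simp only []
  generalize hB : (data.foldl
      (fun (st : Bool × Int) item =>
        let bit : Bool := decide (PySem.Str.pyGet? item index = some '1')
        if st.2 = 0 then (bit, 1)
        else if bit = st.1 then (st.1, st.2 + 1)
        else (st.1, st.2 - 1))
      (false, 0)) = st at h1 h2 ⊢
  generalize hA : (data.foldl
      (fun (acc : Int × Int) item =>
        if PySem.Str.pyGet? item index = some '1' then (acc.1 + 1, acc.2) else (acc.1, acc.2 + 1))
      (0, 0)) = cs at h2 ⊢
  obtain ⟨c, k⟩ := st
  obtain ⟨o, z⟩ := cs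
  rcases c with _ | _
  · simp only [Bool.false_and, decide_eq_false_iff_not, not_lt]
    simp at h2
    omega
  · simp only [Bool.true_and, decide_eq_decide]
    simp at h2
    omega
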